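-- pv_equiv track=rewrite | github.com/dangorgs/MDF_viewer | lib/MDF_pars.py | extract_non_IO_channel_name
-- ===== SOURCE A (Python) =====
-- def extract_non_IO_channel_name(arg, dict, index, set, cg_index):
--     tbl_dict=[]
--     appearance=0
--     char_start="/"
--     char_end="/"
--
--     channel_name_pos = 1 # counting of the character "/" from the end of the signal string
--     channel_name=arg
--
--     #extract name phase 1
--     channel_type_In="In"
--     channel_type_Out="Out"
--     channel_type_run="Runnable Function"
--     channel_type_rep="TA_Replacevalue"
--
--
--     if arg.find(char_start) == -1:
--         channel_name = arg
--         return channel_name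
--
--     i=0
--     while i < channel_name_pos:
--         pos=channel_name.rindex(char_start)
--         channel_name=channel_name[pos:]
--         i+=1
--
--     #extract name phase 2
--     channel_name_chk=channel_name[1:]
--     #Check if Matlab model In/Out sigbnals
--     if channel_name_chk.find(channel_type_In) != -1 or channel_name_chk.find(channel_type_Out) != -1:
--         channel_name=arg
--         pos=arg.rindex(char_start)
--         i=0
--         while i < channel_name_pos:
--             pos=channel_name.rindex(char_start)
--             channel_name=channel_name[:pos]
--             i+=1
--         pos=channel_name.rindex(char_end)
--         channel_name=channel_name[pos:]
--         channel_name=channel_name[1:]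
--     elif channel_name_chk.find(channel_type_run) != -1:
--         #Runtime processor model signals
--         char_end="-"
--         pos=channel_name.rindex(char_end)
--         channel_name=channel_name[:pos]
--         channel_name=channel_name[1:]
--     elif channel_name_chk.find(channel_type_rep)  != -1:
--         #Model request/replacment values
--         channel_name=arg
--         channel_name_pos = 3
--         pos=arg.rindex(char_start)
--         i=0
--         #extract name phase 1
--         while i < channel_name_pos:
--             pos=channel_name.rindex(char_start)
--             channel_name=channel_name[:pos]
--             i+=1
--         #extract name phase 2
--         pos=channel_name.rindex(char_end)
--         channel_name=channel_name[pos:]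
--         channel_name=channel_name[1:]
--
--     else:
--         #Not identified channel
--         #channel_name = "∑_Ch_Undef"+"_"+str(index)
--         #channel_name = "∫_Ch_Undef"+"_"+str(index)
--         #Create unique name
--         channel_name = "Ch_Undef"+"_" + str(set)+ str(cg_index+1)+ "_" + str(index+1)
--
--     #Inspect if more than one occurrence of a channel name
--     for i in range(len(dict)):
--         tbl_dict.append((list(dict.items())[i][0]))
--     appearance=tbl_dict.count(channel_name)
--
--     if appearance!=0:
--         if channel_name.find("Ch_Undef") == -1:
--             channel_name=channel_name + "_" + str(set)+ str(cg_index+1)+ "_" + str(index+1)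
--     return channel_name
-- ===== SOURCE B (Python) =====
-- def extract_non_IO_channel_name(arg, dict, index, set, cg_index):
--     # Split once on "/" and index segments from the end instead of A's repeated rindex/slice loops.
--     if arg.find("/") == -1:
--         return arg
--     segs = arg.split("/")
--     last = segs[-1]
--     suffix = "_" + str(set) + str(cg_index + 1) + "_" + str(index + 1)
--     if "In" in last or "Out" in last:
--         channel_name = segs[-2]
--     elif "Runnable Function" in last:
--         channel_name = last[: last.rindex("-")]
--     elif "TA_Replacevalue" in last:
--         channel_name = segs[-4]
--     else:
--         return "Ch_Undef" + suffix
--     if channel_name in dict: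
--         if "Ch_Undef" not in channel_name:
--             channel_name = channel_name + suffix
--     return channel_name
-- ===== Notes on version B (the rewrite author's own statement) =====
-- stated objective: simpler
-- what changed: B splits arg once on '/' and indexes the segment list from the end (last segment classifies the channel, segs[-2]/segs[-4] or a single rindex on the last segment pick the name), replacing A's repeated rindex/slice while-loops and its dict-keys rebuild loop with a direct key-membership test.
import Mathlib
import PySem

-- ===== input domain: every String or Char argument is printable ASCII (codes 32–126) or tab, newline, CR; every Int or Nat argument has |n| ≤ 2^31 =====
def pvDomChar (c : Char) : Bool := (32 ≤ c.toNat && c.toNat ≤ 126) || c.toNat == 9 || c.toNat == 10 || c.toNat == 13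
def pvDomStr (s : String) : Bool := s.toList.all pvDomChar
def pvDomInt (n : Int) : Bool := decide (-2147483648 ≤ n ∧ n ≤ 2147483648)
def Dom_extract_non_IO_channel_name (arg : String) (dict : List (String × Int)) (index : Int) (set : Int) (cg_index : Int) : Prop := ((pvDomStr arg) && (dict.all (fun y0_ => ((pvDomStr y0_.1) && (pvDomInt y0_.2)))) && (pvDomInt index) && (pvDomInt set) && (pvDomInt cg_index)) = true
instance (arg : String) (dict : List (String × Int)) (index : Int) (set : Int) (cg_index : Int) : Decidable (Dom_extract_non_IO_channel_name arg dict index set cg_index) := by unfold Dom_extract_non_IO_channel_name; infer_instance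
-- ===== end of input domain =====

-- B derives the name by splitting `arg` once on "/" and indexing the segment list from the end,
-- instead of A's repeated rindex/slice while-loops; return values agree on all inputs where A returns.

-- ===== PORT A =====
def extract_non_IO_channel_name (arg : String) (dict : List (String × Int)) (index : Int) (set : Int) (cg_index : Int) : String :=
  if PySem.Str.find arg "/" = -1 then arg
  else
    -- while i < channel_name_pos (= 1): channel_name = channel_name[channel_name.rindex("/"):]
    let cn := (PySem.List.pyRange 0 1).foldl
      (fun cn _ => PySem.Str.slice cn (some (PySem.Str.rfind cn "/")) none) arg
    let chk := PySem.Str.slice cn (some 1) none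
    let cn :=
      if PySem.Str.find chk "In" ≠ -1 ∨ PySem.Str.find chk "Out" ≠ -1 then
        -- channel_name = arg; while i < 1: channel_name = channel_name[:channel_name.rindex("/")]
        let cn := (PySem.List.pyRange 0 1).foldl
          (fun cn _ => PySem.Str.slice cn none (some (PySem.Str.rfind cn "/"))) arg
        let cn := PySem.Str.slice cn (some (PySem.Str.rfind cn "/")) none
        PySem.Str.slice cn (some 1) none
      else if PySem.Str.find chk "Runnable Function" ≠ -1 then
        let cn := PySem.Str.slice cn none (some (PySem.Str.rfind cn "-"))
        PySem.Str.slice cn (some 1) none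
      else if PySem.Str.find chk "TA_Replacevalue" ≠ -1 then
        -- channel_name = arg; while i < 3: channel_name = channel_name[:channel_name.rindex("/")]
        let cn := (PySem.List.pyRange 0 3).foldl
          (fun cn _ => PySem.Str.slice cn none (some (PySem.Str.rfind cn "/"))) arg
        let cn := PySem.Str.slice cn (some (PySem.Str.rfind cn "/")) none
        PySem.Str.slice cn (some 1) none
      else
        "Ch_Undef" ++ "_" ++ PySem.Int.toStr set ++ PySem.Int.toStr (cg_index + 1) ++ "_" ++ PySem.Int.toStr (index + 1)
    -- for i in range(len(dict)): tbl_dict.append(list(dict.items())[i][0])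
    let tbl := (PySem.List.pyRange 0 (PySem.List.len dict)).foldl
      (fun acc i => acc ++ [(PySem.List.pyGetD dict i ("", (0 : Int))).1]) []
    let appearance := PySem.List.count tbl cn
    if appearance ≠ 0 then
      if PySem.Str.find cn "Ch_Undef" = -1 then
        cn ++ "_" ++ PySem.Int.toStr set ++ PySem.Int.toStr (cg_index + 1) ++ "_" ++ PySem.Int.toStr (index + 1)
      else cn
    else cn

-- ===== PORT B =====
-- shared tail of Source B: `if channel_name in dict: if "Ch_Undef" not in channel_name: channel_name += suffix`
def pvFinish (dict : List (String × Int)) (sfx name : String) : String :=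
  if dict.any (fun p => p.1 == name) then   -- `name in dict` (key membership)
    if PySem.Str.isIn "Ch_Undef" name then name else name ++ sfx
  else name

def extract_non_IO_channel_name_alt (arg : String) (dict : List (String × Int)) (index : Int) (set : Int) (cg_index : Int) : String :=
  if PySem.Str.find arg "/" = -1 then arg
  else
    let segs := (PySem.Str.split? arg "/").getD []   -- sep "/" is nonempty, so split? is always `some`
    let last := PySem.List.pyGetD segs (-1) ""
    let sfx := "_" ++ PySem.Int.toStr set ++ PySem.Int.toStr (cg_index + 1) ++ "_" ++ PySem.Int.toStr (index + 1)
    if PySem.Str.isIn "In" last || PySem.Str.isIn "Out" last then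
      pvFinish dict sfx (PySem.List.pyGetD segs (-2) "")
    else if PySem.Str.isIn "Runnable Function" last then
      pvFinish dict sfx (PySem.Str.slice last none (some (PySem.Str.rfind last "-")))
    else if PySem.Str.isIn "TA_Replacevalue" last then
      pvFinish dict sfx (PySem.List.pyGetD segs (-4) "")
    else "Ch_Undef" ++ sfx

-- ===== PRECONDITION & SPEC =====
-- Pre_ excludes exactly the inputs where A raises ValueError from rindex: when "/" occurs in arg,
-- the In/Out branch needs at least 3 "/"-segments, the Runnable branch needs a "-" in the last
-- segment, and the TA_Replacevalue branch needs at least 5 segments.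
def Pre_extract_non_IO_channel_name (arg : String) (dict : List (String × Int)) (index : Int) (set : Int) (cg_index : Int) : Prop :=
  PySem.Chars.isIn ['/'] arg.toList = true →
    (let segs := PySem.Chars.splitOn arg.toList ['/']
     let last := PySem.List.pyGetD segs (-1) []
     if PySem.Chars.isIn "In".toList last || PySem.Chars.isIn "Out".toList last then
       3 ≤ segs.length
     else if PySem.Chars.isIn "Runnable Function".toList last then
       '-' ∈ last
     else if PySem.Chars.isIn "TA_Replacevalue".toList last then
       5 ≤ segs.length
     else True)
instance (arg : String) (dict : List (String × Int)) (index : Int) (set : Int) (cg_index : Int) : Decidable (Pre_extract_non_IO_channel_name arg dict index set cg_index) := by unfold Pre_extract_non_IO_channel_name; infer_instance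

def pvWitness_extract_non_IO_channel_name : String × (List (String × Int)) × Int × Int × Int :=
  ("a/b/In", [("b", 1)], 0, 0, 0)

def Spec_extract_non_IO_channel_name (arg : String) (dict : List (String × Int)) (index : Int) (set : Int) (cg_index : Int) (out : String) : Prop := out = extract_non_IO_channel_name_alt arg dict index set cg_index
instance (arg : String) (dict : List (String × Int)) (index : Int) (set : Int) (cg_index : Int) (out : String) : Decidable (Spec_extract_non_IO_channel_name arg dict index set cg_index out) := by unfold Spec_extract_non_IO_channel_name; infer_instance

-- ===== CLAIM (what is proved, stated in full; the proofs are below) =====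
def Claim_equal_extract_non_IO_channel_name : Prop := ∀ (arg : String) (dict : List (String × Int)) (index : Int) (set : Int) (cg_index : Int), Dom_extract_non_IO_channel_name arg dict index set cg_index → Pre_extract_non_IO_channel_name arg dict index set cg_index → Spec_extract_non_IO_channel_name arg dict index set cg_index (extract_non_IO_channel_name arg dict index set cg_index)

-- ===== LEMMAS AND PROOFS =====

theorem pv_lastSplit {c : Char} {l : List Char} (h : c ∈ l) :
    ∃ u v, l = u ++ c :: v ∧ c ∉ v := by
  induction l with
  | nil => cases h
  | cons x xs ih =>
    by_cases hx : c ∈ xs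
    · obtain ⟨u, v, rfl2, hv⟩ := ih hx
      exact ⟨x :: u, v, by simp [rfl2], hv⟩
    · rcases List.mem_cons.mp h with h1 | h1
      · exact ⟨[], xs, by simp [h1], hx⟩
      · exact absurd h1 hx

theorem pv_firstSplit {c : Char} {l : List Char} (h : c ∈ l) :
    ∃ u v, l = u ++ c :: v ∧ c ∉ u := by
  induction l with
  | nil => cases h
  | cons x xs ih =>
    by_cases hx : x = c
    · exact ⟨[], xs, by simp [hx], by simp⟩
    · rcases List.mem_cons.mp h with h1 | h1
      · exact absurd h1.symm hx
      · obtain ⟨u, v, rfl2, hu⟩ := ih h1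
        refine ⟨x :: u, v, by simp [rfl2], ?_⟩
        intro hm
        rcases List.mem_cons.mp hm with h2 | h2
        · exact hx h2.symm
        · exact hu h2

theorem pv_rfind_go {c : Char} (u v : List Char) (hv : c ∉ v) :
    ∀ k, u.length ≤ k → k ≤ u.length + 1 + v.length →
      PySem.Chars.rfind.go (u ++ c :: v) [c] k = u.length := by
  intro k
  induction k with
  | zero =>
    intro h1 _
    have hu : u = [] := by
      cases u with | nil => rfl | cons a t => simp at h1
    subst hu
    simp [PySem.Chars.rfind.go, List.isPrefixOf]
  | succ j ih =>
    intro h1 h2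
    by_cases he : u.length = j + 1
    · have : List.drop (j+1) (u ++ c :: v) = c :: v := by
        rw [← he]; exact List.drop_left
      simp [PySem.Chars.rfind.go, this, List.isPrefixOf, he]
    · have hlt : u.length ≤ j := by omega
      have hpre : ([c].isPrefixOf (List.drop (j+1) (u ++ c :: v))) = false := by
        rw [Bool.eq_false_iff]
        intro hp
        have hinf : [c] <+: List.drop (j+1) (u ++ c :: v) := by
          exact List.isPrefixOf_iff_prefix.mp hp
        have hc : c ∈ List.drop (j+1) (u ++ c :: v) := hinf.subset (by simp)
        have heq : List.drop (j+1) (u ++ c :: v) = List.drop (j + 1 - u.length) (c :: v) := by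
          rw [List.drop_append, List.drop_eq_nil_of_le (by omega : u.length ≤ j + 1)]
          simp
        rw [heq, show j + 1 - u.length = (j - u.length) + 1 by omega, List.drop_succ_cons] at hc
        exact hv (List.drop_subset _ _ hc)
      simp only [PySem.Chars.rfind.go, hpre]
      exact ih hlt (by omega)

theorem pv_rfind {c : Char} (u v : List Char) (hv : c ∉ v) :
    PySem.Chars.rfind (u ++ c :: v) [c] = u.length := by
  have := pv_rfind_go u v hv (u ++ c :: v).length (by simp) (by simp; omega)
  simpa [PySem.Chars.rfind] using this

def pvSplit (c : Char) : List Char → List Char → List (List Char)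
  | [], cur => [cur.reverse]
  | x :: xs, cur => if x = c then cur.reverse :: pvSplit c xs [] else pvSplit c xs (x :: cur)

theorem pv_splitOn_go (c : Char) :
    ∀ (fuel : Nat) (l cur acc : _), l.length ≤ fuel →
      PySem.Chars.splitOn.go [c] fuel l cur acc = acc.reverse ++ pvSplit c l cur := by
  intro fuel
  induction fuel with
  | zero =>
    intro l cur acc h
    have hl : l = [] := by cases l with | nil => rfl | cons a t => simp at h
    subst hl
    simp [PySem.Chars.splitOn.go, pvSplit]
  | succ f ih =>
    intro l cur acc h
    cases l with
    | nil => simp [PySem.Chars.splitOn.go, pvSplit]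
    | cons x xs =>
      by_cases hx : x = c
      · have : [c].isPrefixOf (x :: xs) = true := by simp [List.isPrefixOf, hx]
        simp only [PySem.Chars.splitOn.go, this]
        rw [ih _ _ _ (by simp at h ⊢; omega)]
        simp [pvSplit, hx]
      · have : [c].isPrefixOf (x :: xs) = false := by simp [List.isPrefixOf]; exact fun hh => hx hh.symm
        simp only [PySem.Chars.splitOn.go, this]
        rw [pvSplit, if_neg hx]
        exact ih _ _ _ (by simp at h ⊢; omega)

theorem pv_splitOn_eq (c : Char) (l : List Char) :
    PySem.Chars.splitOn l [c] = pvSplit c l [] := by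
  have := pv_splitOn_go c (l.length + 1) l [] [] (by omega)
  simpa [PySem.Chars.splitOn] using this

theorem pvSplit_no {c : Char} : ∀ {l : List Char}, c ∉ l → ∀ cur, pvSplit c l cur = [cur.reverse ++ l]
  | [], _, cur => by simp [pvSplit]
  | x :: xs, h, cur => by
    have hx : ¬ x = c := fun hh => h (by simp [hh])
    rw [pvSplit, if_neg hx, pvSplit_no (fun hh => h (by simp [hh])) (x :: cur)]
    simp

theorem pvSplit_split {c : Char} : ∀ {u : List Char}, c ∉ u → ∀ (v cur : List Char),
    pvSplit c (u ++ c :: v) cur = (cur.reverse ++ u) :: pvSplit c v []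
  | [], _, v, cur => by simp [pvSplit]
  | x :: xs, h, v, cur => by
    have hx : ¬ x = c := fun hh => h (by simp [hh])
    rw [List.cons_append, pvSplit, if_neg hx, pvSplit_split (fun hh => h (by simp [hh])) v (x :: cur)]
    simp

theorem pv_splitOn_no {c : Char} {l : List Char} (h : c ∉ l) :
    PySem.Chars.splitOn l [c] = [l] := by
  rw [pv_splitOn_eq, pvSplit_no h]; simp

theorem pv_splitOn_split {c : Char} {u : List Char} (hu : c ∉ u) (v : List Char) :
    PySem.Chars.splitOn (u ++ c :: v) [c] = u :: PySem.Chars.splitOn v [c] := by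
  rw [pv_splitOn_eq, pvSplit_split hu, ← pv_splitOn_eq]; simp

theorem pv_join_cons (c : Char) (u : List Char) {rest : List (List Char)} (h : rest ≠ []) :
    PySem.Chars.join [c] (u :: rest) = u ++ c :: PySem.Chars.join [c] rest := by
  cases rest with
  | nil => exact absurd rfl h
  | cons b t => simp [PySem.Chars.join, List.intercalate]

theorem pv_join_append_last (c : Char) {init : List (List Char)} (h : init ≠ []) (lst : List Char) :
    PySem.Chars.join [c] (init ++ [lst]) = PySem.Chars.join [c] init ++ c :: lst := by
  induction init with
  | nil => exact absurd rfl h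
  | cons a t ih =>
    cases t with
    | nil => simp [PySem.Chars.join, List.intercalate]
    | cons b t2 =>
      rw [List.cons_append, pv_join_cons c a (by simp), ih (by simp), pv_join_cons c a (by simp)]
      simp

theorem pv_split_spec (c : Char) : ∀ (n : Nat) (l : List Char), l.length ≤ n →
    PySem.Chars.join [c] (PySem.Chars.splitOn l [c]) = l ∧
    (∀ s ∈ PySem.Chars.splitOn l [c], c ∉ s) ∧ PySem.Chars.splitOn l [c] ≠ [] := by
  intro n
  induction n with
  | zero =>
    intro l h
    have hl : l = [] := by cases l with | nil => rfl | cons a t => simp at h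
    subst hl
    rw [pv_splitOn_no (by simp)]
    simp [PySem.Chars.join, List.intercalate]
  | succ m ih =>
    intro l h
    by_cases hc : c ∈ l
    · obtain ⟨u, v, rfl2, hu⟩ := pv_firstSplit hc
      subst rfl2
      rw [pv_splitOn_split hu]
      obtain ⟨h1, h2, h3⟩ := ih v (by simp at h; omega)
      refine ⟨?_, ?_, by simp⟩
      · rw [pv_join_cons c u h3, h1]
      · intro s hs
        rcases List.mem_cons.mp hs with h4 | h4
        · exact h4 ▸ hu
        · exact h2 s h4
    · rw [pv_splitOn_no hc]
      simp [PySem.Chars.join, List.intercalate]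
      exact hc

theorem pv_pyGetD_neg {α : Type} (xs : List α) (d : α) (n : Nat) (h1 : 1 ≤ n) (h2 : n ≤ xs.length) :
    PySem.List.pyGetD xs (-(n : Int)) d = xs.getD (xs.length - n) d := by
  have hneg : ¬ (0 : Int) ≤ -(n : Int) := by omega
  simp only [PySem.List.pyGetD, PySem.List.pyGet?, PySem.List.pyIdx?, if_neg hneg,
    if_pos (by omega : -(xs.length : Int) ≤ -(n : Int))]
  simp [List.getD, Int.toNat_natCast]

theorem pv_finish_eq (dict : List (String × Int)) (sfx name : String) :
    (if PySem.List.count ((PySem.List.pyRange 0 (PySem.List.len dict)).foldl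
        (fun acc i => acc ++ [(PySem.List.pyGetD dict i ("", (0 : Int))).1]) []) name ≠ 0 then
      if PySem.Str.find name "Ch_Undef" = -1 then name ++ sfx else name
     else name) = pvFinish dict sfx name := by
  have htbl : (PySem.List.pyRange 0 (PySem.List.len dict)).foldl
      (fun acc i => acc ++ [(PySem.List.pyGetD dict i ("", (0 : Int))).1]) [] = dict.map Prod.fst := by
    rw [PySem.List.foldl_append_singleton_eq_map]
    have := PySem.List.map_pyGetD_pyRange_zero dict ("", (0 : Int))
    calc (PySem.List.pyRange 0 (PySem.List.len dict)).map (fun i => (PySem.List.pyGetD dict i ("", (0:Int))).1)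
        = ((PySem.List.pyRange 0 (PySem.List.len dict)).map (fun j => PySem.List.pyGetD dict j ("", (0:Int)))).map Prod.fst := by
          rw [List.map_map]; rfl
      _ = dict.map Prod.fst := by rw [this]
  rw [htbl]
  have hcnt : (PySem.List.count (dict.map Prod.fst) name ≠ 0) ↔ (dict.any (fun p => p.1 == name) = true) := by
    simp [PySem.List.count, List.count, List.countP_eq_zero, List.any_eq_true]
  have hund : (PySem.Str.find name "Ch_Undef" = -1) ↔ (PySem.Str.isIn "Ch_Undef" name = false) := by
    rw [PySem.Str.isIn_eq, PySem.Chars.isIn]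
    simp [bne]
  unfold pvFinish
  by_cases hmem : dict.any (fun p => p.1 == name) = true
  · rw [if_pos (hcnt.mpr hmem), if_pos hmem]
    by_cases hu : PySem.Str.isIn "Ch_Undef" name = true
    · rw [if_pos hu, if_neg (fun hf => by rw [hund] at hf; rw [hf] at hu; cases hu)]
    · rw [if_neg hu, if_pos (hund.mpr (by simpa using hu))]
  · rw [if_neg (by rw [hcnt]; exact hmem), if_neg hmem]

theorem pv_join_singleton (c : Char) (u : List Char) : PySem.Chars.join [c] [u] = u := by
  simp [PySem.Chars.join, List.intercalate]

theorem pv_undef_find (r : String) : PySem.Str.find ("Ch_Undef" ++ r) "Ch_Undef" ≠ -1 := by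
  rw [PySem.Str.find_ne_neg_one_iff, String.toList_append]
  exact (List.prefix_append _ _).isInfix


theorem pv_pyGetD_m1 {α : Type} (xs : List α) (x : α) (d : α) :
    PySem.List.pyGetD (xs ++ [x]) (-1) d = x := by
  simpa using pv_pyGetD_neg (xs ++ [x]) d 1 le_rfl (by simp)

theorem pv_pyGetD_m2 {α : Type} (xs : List α) (x y : α) (d : α) :
    PySem.List.pyGetD (xs ++ [x, y]) (-2) d = x := by
  have h := pv_pyGetD_neg (xs ++ [x, y]) d 2 (by omega) (by simp)
  norm_num at h
  exact h

theorem pv_pyGetD_m4 {α : Type} (xs : List α) (a b c e : α) (d : α) :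
    PySem.List.pyGetD (xs ++ [a, b, c, e]) (-4) d = a := by
  have h := pv_pyGetD_neg (xs ++ [a, b, c, e]) d 4 (by omega) (by simp)
  norm_num at h
  exact h

set_option maxHeartbeats 2000000 in
theorem extract_non_IO_channel_name_spec : Claim_equal_extract_non_IO_channel_name := by
  intro arg dict index set cg_index _hDom hPre
  unfold Spec_extract_non_IO_channel_name
  unfold Pre_extract_non_IO_channel_name at hPre
  by_cases hf : PySem.Str.find arg "/" = -1
  · unfold extract_non_IO_channel_name extract_non_IO_channel_name_alt
    rw [if_pos hf, if_pos hf]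
  · have hmem : '/' ∈ arg.toList := by
      have h1 := (PySem.Str.find_ne_neg_one_iff arg "/").mp hf
      exact h1.subset (by decide)
    -- split arg into segments
    obtain ⟨hjoin, hfree, hne⟩ := pv_split_spec '/' arg.toList.length arg.toList le_rfl
    set segs := PySem.Chars.splitOn arg.toList ['/'] with hsegs
    have hlen2 : 2 ≤ segs.length := by
      rcases hs2 : segs with _ | ⟨a, t⟩
      · exact absurd hs2 hne
      rcases t with _ | ⟨b, t2⟩
      · exfalso
        rw [hs2, pv_join_singleton] at hjoin
        exact (hfree a (by rw [hs2]; simp)) (hjoin ▸ hmem)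
      · simp
    obtain ⟨init, lst, hdec⟩ : ∃ init lst, segs = init ++ [lst] :=
      ⟨segs.dropLast, segs.getLast hne, (List.dropLast_append_getLast hne).symm⟩
    have hinit_ne : init ≠ [] := by
      intro h0; rw [h0] at hdec; rw [hdec] at hlen2; simp at hlen2
    have hlst_free : '/' ∉ lst := hfree lst (by rw [hdec]; simp)
    have hinit_free : ∀ s ∈ init, '/' ∉ s := fun s hs => hfree s (by rw [hdec]; simp [hs])
    have hcs : arg.toList = PySem.Chars.join ['/'] init ++ '/' :: lst := by
      rw [← hjoin, hdec, pv_join_append_last '/' hinit_ne]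
    have hrf : PySem.Str.rfind arg "/" = ((PySem.Chars.join ['/'] init).length : Int) := by
      rw [PySem.Str.rfind_eq, show "/".toList = ['/'] from rfl, hcs]
      exact pv_rfind _ _ hlst_free
    obtain ⟨L, hL, hLm⟩ : ∃ L, PySem.Str.split? arg "/" = some L ∧ L.map String.toList = segs := by
      have h2 := PySem.Str.split?_map arg "/"
      rw [show "/".toList = ['/'] from rfl] at h2
      simp only [PySem.Chars.split?, List.isEmpty_cons] at h2
      cases hS : PySem.Str.split? arg "/" with
      | none => rw [hS] at h2; simp at h2
      | some L2 => rw [hS] at h2; simp at h2; exact ⟨L2, rfl, h2⟩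
    have hlastL : (PySem.List.pyGetD L (-1) "").toList = lst := by
      have hm := PySem.List.pyGetD_map String.toList L (-1) ""
      rw [show String.toList "" = ([] : List Char) from rfl, hLm, hdec] at hm
      rw [← hm, pv_pyGetD_m1]
    have hsegs_last : PySem.List.pyGetD segs (-1) ([] : List Char) = lst := by
      rw [hdec]; exact pv_pyGetD_m1 init lst []
    have hr1 : PySem.List.pyRange 0 1 = [0] := by decide
    have hr3 : PySem.List.pyRange 0 3 = [0, 1, 2] := by decide
    have hcn1 : (PySem.Str.slice arg (some (PySem.Str.rfind arg "/")) none).toList = '/' :: lst := by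
      rw [PySem.Str.toList_slice, hrf, PySem.Chars.slice_eq_listSlice,
        PySem.List.slice_from _ (by positivity), hcs, Int.toNat_natCast, List.drop_left]
    have hchk : (PySem.Str.slice (PySem.Str.slice arg (some (PySem.Str.rfind arg "/")) none) (some 1) none).toList = lst := by
      rw [PySem.Str.toList_slice, PySem.Chars.slice_eq_listSlice,
        PySem.List.slice_from _ (by norm_num), hcn1]
      simp
    have hinf : PySem.Chars.isIn ['/'] arg.toList = true := by
      rw [PySem.Chars.isIn_iff_infix]
      obtain ⟨u, v, he, _⟩ := pv_lastSplit hmem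
      exact ⟨u, v, by rw [he]; simp⟩
    have hpre' := hPre hinf
    simp only [hsegs_last] at hpre'
    -- A's chk and B's last have the same characters lst; link all four tests to lst
    have hfIn := fun sub => (PySem.Str.find_eq (PySem.Str.slice (PySem.Str.slice arg (some (PySem.Str.rfind arg "/")) none) (some 1) none) sub).trans (by rw [hchk])
    have hbIn := fun sub => (PySem.Str.isIn_eq sub (PySem.List.pyGetD L (-1) "")).trans (by rw [hlastL])
    unfold extract_non_IO_channel_name extract_non_IO_channel_name_alt
    rw [if_neg hf, if_neg hf, hL]
    simp only [hr1, hr3, List.foldl, Option.getD_some, hfIn, hbIn]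
    have hT : (PySem.Str.slice arg none (some (PySem.Str.rfind arg "/"))).toList = PySem.Chars.join ['/'] init := by
      rw [PySem.Str.toList_slice, hrf, PySem.Chars.slice_eq_listSlice,
        PySem.List.slice_to _ (by positivity), hcs, Int.toNat_natCast, List.take_left]
    by_cases hIn : PySem.Chars.find lst "In".toList ≠ -1 ∨ PySem.Chars.find lst "Out".toList ≠ -1
    · -- In/Out branch
      have hb : (PySem.Chars.isIn "In".toList lst || PySem.Chars.isIn "Out".toList lst) = true := by
        simp only [PySem.Chars.isIn, Bool.or_eq_true, bne_iff_ne]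
        exact hIn
      simp only [hb] at hpre'
      replace hpre' : 3 ≤ segs.length := by simpa using hpre'
      simp only [eq_true hIn, if_true, hb]
      obtain ⟨i2, l2, hdec2⟩ : ∃ i2 l2, init = i2 ++ [l2] :=
        ⟨init.dropLast, init.getLast hinit_ne, (List.dropLast_append_getLast hinit_ne).symm⟩
      have hi2_ne : i2 ≠ [] := by
        intro h0
        rw [h0] at hdec2
        rw [hdec2] at hdec; rw [hdec] at hpre'; simp at hpre'
      have hl2_free : '/' ∉ l2 := hinit_free l2 (by rw [hdec2]; simp)
      have hjoin2 : PySem.Chars.join ['/'] init = PySem.Chars.join ['/'] i2 ++ '/' :: l2 := by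
        rw [hdec2, pv_join_append_last '/' hi2_ne]
      have hrfT : PySem.Str.rfind (PySem.Str.slice arg none (some (PySem.Str.rfind arg "/"))) "/" = ((PySem.Chars.join ['/'] i2).length : Int) := by
        rw [PySem.Str.rfind_eq, show "/".toList = ['/'] from rfl, hT, hjoin2]
        exact pv_rfind _ _ hl2_free
      have hnameA : (PySem.Str.slice (PySem.Str.slice (PySem.Str.slice arg none (some (PySem.Str.rfind arg "/"))) (some (PySem.Str.rfind (PySem.Str.slice arg none (some (PySem.Str.rfind arg "/"))) "/")) none) (some 1) none).toList = l2 := by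
        rw [PySem.Str.toList_slice, PySem.Chars.slice_eq_listSlice, PySem.List.slice_from _ (by norm_num),
          PySem.Str.toList_slice, hrfT, PySem.Chars.slice_eq_listSlice, PySem.List.slice_from _ (by positivity),
          hT, hjoin2, Int.toNat_natCast, List.drop_left]
        simp
      have hnameB : (PySem.List.pyGetD L (-2) "").toList = l2 := by
        have hm := PySem.List.pyGetD_map String.toList L (-2) ""
        rw [show String.toList "" = ([] : List Char) from rfl, hLm, hdec, hdec2, List.append_assoc] at hm
        rw [← hm]
        simpa using pv_pyGetD_m2 i2 l2 lst []
      have heqS : PySem.Str.slice (PySem.Str.slice (PySem.Str.slice arg none (some (PySem.Str.rfind arg "/"))) (some (PySem.Str.rfind (PySem.Str.slice arg none (some (PySem.Str.rfind arg "/"))) "/")) none) (some 1) none = PySem.List.pyGetD L (-2) "" :=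
        String.toList_inj.mp (hnameA.trans hnameB.symm)
      rw [heqS]
      simpa only [String.append_assoc] using pv_finish_eq dict ("_" ++ PySem.Int.toStr set ++ PySem.Int.toStr (cg_index + 1) ++ "_" ++ PySem.Int.toStr (index + 1)) (PySem.List.pyGetD L (-2) "")
    · -- not In/Out
      push_neg at hIn
      have hbf : (PySem.Chars.isIn "In".toList lst || PySem.Chars.isIn "Out".toList lst) = false := by
        simp only [PySem.Chars.isIn]
        rw [hIn.1, hIn.2]
        decide
      have hInN : ¬ (PySem.Chars.find lst "In".toList ≠ -1 ∨ PySem.Chars.find lst "Out".toList ≠ -1) := by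
        push_neg; exact hIn
      simp only [hbf] at hpre'
      simp only [Bool.false_eq_true, if_false] at hpre'
      simp only [eq_false hInN, if_false, hbf, Bool.false_eq_true]
      by_cases hRun : PySem.Chars.find lst "Runnable Function".toList ≠ -1
      · -- Runnable branch
        have hbr : PySem.Chars.isIn "Runnable Function".toList lst = true := by
          simp only [PySem.Chars.isIn, bne_iff_ne]; exact hRun
        simp only [hbr, if_true] at hpre'
        simp only [eq_true hRun, if_true, hbr]
        obtain ⟨p, q, hpq, hq⟩ := pv_lastSplit hpre'
        have hrfD : PySem.Str.rfind (PySem.Str.slice arg (some (PySem.Str.rfind arg "/")) none) "-" = ((('/' :: p).length : Int)) := by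
          rw [PySem.Str.rfind_eq, show "-".toList = ['-'] from rfl, hcn1, hpq,
            show '/' :: (p ++ '-' :: q) = ('/' :: p) ++ '-' :: q from rfl]
          exact pv_rfind _ _ hq
        have hnameA : (PySem.Str.slice (PySem.Str.slice (PySem.Str.slice arg (some (PySem.Str.rfind arg "/")) none) none (some (PySem.Str.rfind (PySem.Str.slice arg (some (PySem.Str.rfind arg "/")) none) "-"))) (some 1) none).toList = p := by
          rw [PySem.Str.toList_slice, PySem.Chars.slice_eq_listSlice, PySem.List.slice_from _ (by norm_num),
            PySem.Str.toList_slice, hrfD, PySem.Chars.slice_eq_listSlice, PySem.List.slice_to _ (by positivity),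
            hcn1, hpq, Int.toNat_natCast,
            show '/' :: (p ++ '-' :: q) = ('/' :: p) ++ '-' :: q from rfl, List.take_left]
          simp
        have hrfDb : PySem.Str.rfind (PySem.List.pyGetD L (-1) "") "-" = ((p.length : Int)) := by
          rw [PySem.Str.rfind_eq, show "-".toList = ['-'] from rfl, hlastL, hpq]
          exact pv_rfind _ _ hq
        have hnameB : (PySem.Str.slice (PySem.List.pyGetD L (-1) "") none (some (PySem.Str.rfind (PySem.List.pyGetD L (-1) "") "-"))).toList = p := by
          rw [PySem.Str.toList_slice, hrfDb, PySem.Chars.slice_eq_listSlice,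
            PySem.List.slice_to _ (by positivity), hlastL, hpq, Int.toNat_natCast, List.take_left]
        have heqS : PySem.Str.slice (PySem.Str.slice (PySem.Str.slice arg (some (PySem.Str.rfind arg "/")) none) none (some (PySem.Str.rfind (PySem.Str.slice arg (some (PySem.Str.rfind arg "/")) none) "-"))) (some 1) none = PySem.Str.slice (PySem.List.pyGetD L (-1) "") none (some (PySem.Str.rfind (PySem.List.pyGetD L (-1) "") "-")) :=
          String.toList_inj.mp (hnameA.trans hnameB.symm)
        rw [heqS]
        simpa only [String.append_assoc] using pv_finish_eq dict ("_" ++ PySem.Int.toStr set ++ PySem.Int.toStr (cg_index + 1) ++ "_" ++ PySem.Int.toStr (index + 1)) (PySem.Str.slice (PySem.List.pyGetD L (-1) "") none (some (PySem.Str.rfind (PySem.List.pyGetD L (-1) "") "-")))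
      · -- not Runnable
        have hbrf : PySem.Chars.isIn "Runnable Function".toList lst = false := by
          push_neg at hRun
          simp only [PySem.Chars.isIn]
          rw [hRun]
          decide
        simp only [hbrf, Bool.false_eq_true, if_false] at hpre'
        simp only [eq_false hRun, if_false, hbrf, Bool.false_eq_true]
        by_cases hRep : PySem.Chars.find lst "TA_Replacevalue".toList ≠ -1
        · -- TA_Replacevalue branch
          have hbp : PySem.Chars.isIn "TA_Replacevalue".toList lst = true := by
            simp only [PySem.Chars.isIn, bne_iff_ne]; exact hRep
          simp only [hbp, if_true] at hpre'
          simp only [eq_true hRep, if_true, hbp]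
          obtain ⟨i2, l2, hdec2⟩ : ∃ i2 l2, init = i2 ++ [l2] :=
            ⟨init.dropLast, init.getLast hinit_ne, (List.dropLast_append_getLast hinit_ne).symm⟩
          have hlen : 5 ≤ segs.length := by simpa using hpre'
          have hi2len : 3 ≤ i2.length := by
            rw [hdec, hdec2] at hlen; simp at hlen; omega
          have hi2_ne : i2 ≠ [] := by intro h0; rw [h0] at hi2len; simp at hi2len
          obtain ⟨i3, l3, hdec3⟩ : ∃ i3 l3, i2 = i3 ++ [l3] :=
            ⟨i2.dropLast, i2.getLast hi2_ne, (List.dropLast_append_getLast hi2_ne).symm⟩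
          have hi3len : 2 ≤ i3.length := by rw [hdec3] at hi2len; simp at hi2len; omega
          have hi3_ne : i3 ≠ [] := by intro h0; rw [h0] at hi3len; simp at hi3len
          obtain ⟨i4, l4, hdec4⟩ : ∃ i4 l4, i3 = i4 ++ [l4] :=
            ⟨i3.dropLast, i3.getLast hi3_ne, (List.dropLast_append_getLast hi3_ne).symm⟩
          have hi4_ne : i4 ≠ [] := by
            intro h0; rw [hdec4, h0] at hi3len; simp at hi3len
          have hl2_free : '/' ∉ l2 := hinit_free l2 (by rw [hdec2]; simp)
          have hl3_free : '/' ∉ l3 := hinit_free l3 (by rw [hdec2, hdec3]; simp)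
          have hl4_free : '/' ∉ l4 := hinit_free l4 (by rw [hdec2, hdec3, hdec4]; simp)
          have hjoin2 : PySem.Chars.join ['/'] init = PySem.Chars.join ['/'] i2 ++ '/' :: l2 := by
            rw [hdec2, pv_join_append_last '/' hi2_ne]
          have hjoin3 : PySem.Chars.join ['/'] i2 = PySem.Chars.join ['/'] i3 ++ '/' :: l3 := by
            rw [hdec3, pv_join_append_last '/' hi3_ne]
          have hjoin4 : PySem.Chars.join ['/'] i3 = PySem.Chars.join ['/'] i4 ++ '/' :: l4 := by
            rw [hdec4, pv_join_append_last '/' hi4_ne]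
          set T1 := PySem.Str.slice arg none (some (PySem.Str.rfind arg "/")) with hT1def
          clear_value T1
          have hrfT1 : PySem.Str.rfind T1 "/" = ((PySem.Chars.join ['/'] i2).length : Int) := by
            rw [PySem.Str.rfind_eq, show "/".toList = ['/'] from rfl, hT, hjoin2]
            exact pv_rfind _ _ hl2_free
          set T2 := PySem.Str.slice T1 none (some (PySem.Str.rfind T1 "/")) with hT2def
          clear_value T2
          have hT2 : T2.toList = PySem.Chars.join ['/'] i2 := by
            rw [hT2def, PySem.Str.toList_slice, hrfT1, PySem.Chars.slice_eq_listSlice,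
              PySem.List.slice_to _ (by positivity), hT, hjoin2, Int.toNat_natCast, List.take_left]
          have hrfT2 : PySem.Str.rfind T2 "/" = ((PySem.Chars.join ['/'] i3).length : Int) := by
            rw [PySem.Str.rfind_eq, show "/".toList = ['/'] from rfl, hT2, hjoin3]
            exact pv_rfind _ _ hl3_free
          set T3 := PySem.Str.slice T2 none (some (PySem.Str.rfind T2 "/")) with hT3def
          clear_value T3
          have hT3 : T3.toList = PySem.Chars.join ['/'] i3 := by
            rw [hT3def, PySem.Str.toList_slice, hrfT2, PySem.Chars.slice_eq_listSlice,
              PySem.List.slice_to _ (by positivity), hT2, hjoin3, Int.toNat_natCast, List.take_left]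
          have hrfT3 : PySem.Str.rfind T3 "/" = ((PySem.Chars.join ['/'] i4).length : Int) := by
            rw [PySem.Str.rfind_eq, show "/".toList = ['/'] from rfl, hT3, hjoin4]
            exact pv_rfind _ _ hl4_free
          have hS1 : (PySem.Str.slice T3 (some (PySem.Str.rfind T3 "/")) none).toList = '/' :: l4 := by
            rw [PySem.Str.toList_slice, hrfT3, PySem.Chars.slice_eq_listSlice,
              PySem.List.slice_from _ (a := ((PySem.Chars.join ['/'] i4).length : Int)) (by positivity),
              hT3, hjoin4, Int.toNat_natCast, List.drop_left]
          have hnameA : (PySem.Str.slice (PySem.Str.slice T3 (some (PySem.Str.rfind T3 "/")) none) (some 1) none).toList = l4 := by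
            rw [PySem.Str.toList_slice, PySem.Chars.slice_eq_listSlice,
              PySem.List.slice_from _ (a := 1) (by norm_num), hS1]
            simp
          have hnameB : (PySem.List.pyGetD L (-4) "").toList = l4 := by
            have hm := PySem.List.pyGetD_map String.toList L (-4) ""
            rw [show String.toList "" = ([] : List Char) from rfl, hLm, hdec, hdec2, hdec3, hdec4] at hm
            rw [← hm, show (((i4 ++ [l4]) ++ [l3]) ++ [l2]) ++ [lst] = i4 ++ [l4, l3, l2, lst] by simp]
            exact pv_pyGetD_m4 i4 l4 l3 l2 lst ([] : List Char)
          have heqS : PySem.Str.slice (PySem.Str.slice T3 (some (PySem.Str.rfind T3 "/")) none) (some 1) none = PySem.List.pyGetD L (-4) "" :=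
            String.toList_inj.mp (hnameA.trans hnameB.symm)
          rw [heqS]
          simpa only [String.append_assoc] using pv_finish_eq dict ("_" ++ PySem.Int.toStr set ++ PySem.Int.toStr (cg_index + 1) ++ "_" ++ PySem.Int.toStr (index + 1)) (PySem.List.pyGetD L (-4) "")
        · -- Ch_Undef branch
          have hbpf : PySem.Chars.isIn "TA_Replacevalue".toList lst = false := by
            push_neg at hRep
            simp only [PySem.Chars.isIn]
            rw [hRep]
            decide
          simp only [eq_false hRep, if_false, hbpf, Bool.false_eq_true]
          simp only [String.append_assoc]
          rw [if_neg (pv_undef_find ("_" ++ (PySem.Int.toStr set ++ (PySem.Int.toStr (cg_index + 1) ++ ("_" ++ PySem.Int.toStr (index + 1))))))]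
          rw [ite_self]
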